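-- pv_equiv track=rewrite | github.com/talafek96/MTM-EX2 | main_dir/hw2.py | calcKnockoutChamps
-- ===== SOURCE A (Python) =====
-- def calcKnockoutChamps(result_dict):
--     undef_country = 'undef_country'
--     champs = [undef_country, undef_country, undef_country]
--     for comperitor_id in result_dict:
--         if result_dict[comperitor_id] == 1:
--             champs[0] = comperitor_id
--         elif result_dict[comperitor_id] == 2:
--             champs[1] = comperitor_id
--         elif result_dict[comperitor_id] == 3:
--             champs[2] = comperitor_id
--     return champs
-- ===== SOURCE B (Python) =====
-- def calcKnockoutChamps(result_dict):
--     undef_country = 'undef_country'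
--     rev = list(result_dict.items())[::-1]
--
--     def pick(rank):
--         return next((cid for cid, r in rev if r == rank), undef_country)
--
--     return [pick(1), pick(2), pick(3)]
-- ===== Notes on version B (the rewrite author's own statement) =====
-- stated objective: alternative
-- what changed: Instead of a single forward pass mutating three slots with last-write-wins, B reverses the items once and finds the FIRST entry with each rank 1..3 in three short-circuiting scans (first match in the reversed list = last write in the forward loop).
import Mathlib
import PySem

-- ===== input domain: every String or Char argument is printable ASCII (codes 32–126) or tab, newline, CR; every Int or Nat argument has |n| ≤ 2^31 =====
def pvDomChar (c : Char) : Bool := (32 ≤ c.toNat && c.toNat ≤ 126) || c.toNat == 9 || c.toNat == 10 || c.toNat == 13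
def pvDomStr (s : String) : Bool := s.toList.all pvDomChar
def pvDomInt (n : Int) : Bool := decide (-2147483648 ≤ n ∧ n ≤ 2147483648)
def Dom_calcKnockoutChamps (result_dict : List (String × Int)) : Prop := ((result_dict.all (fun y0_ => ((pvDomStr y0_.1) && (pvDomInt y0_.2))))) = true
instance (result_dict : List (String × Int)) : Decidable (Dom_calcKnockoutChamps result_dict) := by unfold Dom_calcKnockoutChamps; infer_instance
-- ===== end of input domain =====

-- B reverses the items once and takes the first match per rank (1,2,3), an alternative first-match-in-reverse decomposition of A's last-write-wins loop.


-- ===== PORT A =====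
-- loop over the dict's entries, updating the three champ slots (dict keys are unique, so d[k] is the entry's value)
def calcKnockoutChamps (result_dict : List (String × Int)) : List String :=
  let undef_country := "undef_country"
  let champs := result_dict.foldl (fun (c : String × String × String) p =>
    if p.2 == 1 then (p.1, c.2.1, c.2.2)
    else if p.2 == 2 then (c.1, p.1, c.2.2)
    else if p.2 == 3 then (c.1, c.2.1, p.1)
    else c) (undef_country, undef_country, undef_country)
  [champs.1, champs.2.1, champs.2.2]

-- ===== PORT B =====
-- reverse once; for each rank take the FIRST match in the reversed list (next(...) with default)
def calcKnockoutChamps_alt (result_dict : List (String × Int)) : List String :=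
  let undef_country := "undef_country"
  let rev := result_dict.reverse  -- items[::-1]
  let pick := fun (rank : Int) => ((rev.find? (fun p => p.2 == rank)).map Prod.fst).getD undef_country
  [pick 1, pick 2, pick 3]

-- ===== PRECONDITION & SPEC =====
def Spec_calcKnockoutChamps (result_dict : List (String × Int)) (out : List String) : Prop := out = calcKnockoutChamps_alt result_dict
instance (result_dict : List (String × Int)) (out : List String) : Decidable (Spec_calcKnockoutChamps result_dict out) := by unfold Spec_calcKnockoutChamps; infer_instance

-- ===== CLAIM (what is proved, stated in full; the proofs are below) =====
def Claim_equal_calcKnockoutChamps : Prop := ∀ (result_dict : List (String × Int)), Dom_calcKnockoutChamps result_dict → Spec_calcKnockoutChamps result_dict (calcKnockoutChamps result_dict)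

-- ===== LEMMAS AND PROOFS =====

-- ===== VERDICT (by name: the statement is the Claim_ definition above) =====
-- loop invariant: each A-slot equals first-match-in-reverse with the current slot as default
theorem calcK_loop (rd : List (String × Int)) (c : String × String × String) :
    (rd.foldl (fun (c : String × String × String) p =>
      if p.2 == 1 then (p.1, c.2.1, c.2.2)
      else if p.2 == 2 then (c.1, p.1, c.2.2)
      else if p.2 == 3 then (c.1, c.2.1, p.1)
      else c) c)
    = (((rd.reverse.find? (fun p => p.2 == (1:Int))).map Prod.fst).getD c.1,
       ((rd.reverse.find? (fun p => p.2 == (2:Int))).map Prod.fst).getD c.2.1,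
       ((rd.reverse.find? (fun p => p.2 == (3:Int))).map Prod.fst).getD c.2.2) := by
  induction rd generalizing c with
  | nil => simp
  | cons p rest ih =>
    obtain ⟨a, b, cc⟩ := c
    simp only [List.foldl_cons, List.reverse_cons, List.find?_append]
    rw [ih]
    congr 1
    · cases h : rest.reverse.find? (fun q => q.2 == (1:Int)) <;>
        simp [h] <;> split_ifs <;> simp_all
    congr 1
    · cases h : rest.reverse.find? (fun q => q.2 == (2:Int)) <;>
        simp [h] <;> split_ifs <;> simp_all
    · cases h : rest.reverse.find? (fun q => q.2 == (3:Int)) <;>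
        simp [h] <;> split_ifs <;> simp_all

theorem calcKnockoutChamps_spec : Claim_equal_calcKnockoutChamps := by
  intro rd _
  unfold Spec_calcKnockoutChamps calcKnockoutChamps calcKnockoutChamps_alt
  simp only [calcK_loop]
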